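-- pv_equiv track=rewrite | github.com/VirtualEvan/Practicas_ALS | examen/ejercicio3.py | es_subconjunto
-- ===== SOURCE A (Python) =====
-- def es_subconjunto(c1, l1):
--     toret = True
--
--     def comporbar_vacio(c1, l1):
--         if not c1 or not l1:
--             return False
--
--         return True
--
--     def comprobar_subconjunto(c1, l1):
--         for c in l1:
--             if not c1.issubset(c):
--                 return False
--         return True
--
--     if not comporbar_vacio(c1, l1):
--         return False
--
--     toret = comprobar_subconjunto(c1, l1)
--
--     return toret
-- ===== SOURCE B (Python) =====
-- def es_subconjunto(c1, l1):
--     if not c1 or not l1: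
--         return False
--     it = iter(l1)
--     inter = set(next(it))
--     for c in it:
--         inter &= set(c)
--     return c1.issubset(inter)
-- ===== Notes on version B (the rewrite author's own statement) =====
-- stated objective: alternative
-- what changed: Replaces the per-collection repeated subset scan with a single fold intersecting all collections of l1 into one aggregate set, followed by one subset test of c1 against that intersection.
import Mathlib
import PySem

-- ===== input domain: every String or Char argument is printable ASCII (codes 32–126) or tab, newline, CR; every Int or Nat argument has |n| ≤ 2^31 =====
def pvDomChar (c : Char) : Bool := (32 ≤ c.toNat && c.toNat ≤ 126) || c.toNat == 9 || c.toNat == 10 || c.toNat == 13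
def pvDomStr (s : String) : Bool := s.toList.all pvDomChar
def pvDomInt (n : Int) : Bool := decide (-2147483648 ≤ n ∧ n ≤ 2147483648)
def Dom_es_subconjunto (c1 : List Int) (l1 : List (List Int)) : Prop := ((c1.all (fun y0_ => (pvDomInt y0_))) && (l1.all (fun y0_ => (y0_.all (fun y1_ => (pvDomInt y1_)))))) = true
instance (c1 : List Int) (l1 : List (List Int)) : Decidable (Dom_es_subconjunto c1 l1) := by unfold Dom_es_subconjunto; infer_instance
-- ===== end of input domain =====

-- B replaces the per-collection subset scan by one fold intersecting all collections, then a single subset test (alternative decomposition, same cost class).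
-- ===== PORT A =====
def pvComprobarSub (c1 : List Int) : List (List Int) → Bool
  | [] => true
  | c :: rest => if !(PySem.Set.issubset c1 c) then false else pvComprobarSub c1 rest

def es_subconjunto (c1 : List Int) (l1 : List (List Int)) : Bool :=
  let comporbarVacio : Bool := if c1 = [] ∨ l1 = [] then false else true
  if !comporbarVacio then false
  else pvComprobarSub c1 l1

-- ===== PORT B =====
def es_subconjunto_alt (c1 : List Int) (l1 : List (List Int)) : Bool :=
  if c1 = [] ∨ l1 = [] then false
  else
    match l1 with
    | [] => false
    | c :: rest =>
      let inter := rest.foldl (fun a c => PySem.Set.inter a (PySem.Set.ofList c)) (PySem.Set.ofList c)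
      PySem.Set.issubset c1 inter

-- ===== PRECONDITION & SPEC =====
def Spec_es_subconjunto (c1 : List Int) (l1 : List (List Int)) (out : Bool) : Prop := out = es_subconjunto_alt c1 l1
instance (c1 : List Int) (l1 : List (List Int)) (out : Bool) : Decidable (Spec_es_subconjunto c1 l1 out) := by unfold Spec_es_subconjunto; infer_instance

-- ===== CLAIM (what is proved, stated in full; the proofs are below) =====
def Claim_equal_es_subconjunto : Prop := ∀ (c1 : List Int) (l1 : List (List Int)), Dom_es_subconjunto c1 l1 → Spec_es_subconjunto c1 l1 (es_subconjunto c1 l1)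

-- ===== LEMMAS AND PROOFS =====
lemma mem_foldl_inter (x : Int) (rest : List (List Int)) (init : List Int) :
    x ∈ rest.foldl (fun a c => PySem.Set.inter a (PySem.Set.ofList c)) init ↔
    x ∈ init ∧ ∀ c ∈ rest, x ∈ c := by
  induction rest generalizing init with
  | nil => simp
  | cons c cs ih =>
    simp only [List.foldl_cons, ih, PySem.Set.mem_inter, PySem.Set.mem_ofList, List.mem_cons]
    constructor
    · rintro ⟨⟨h1, h2⟩, h3⟩
      exact ⟨h1, fun d hd => hd.elim (fun e => e ▸ h2) (h3 d)⟩
    · rintro ⟨h1, h2⟩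
      exact ⟨⟨h1, h2 c (Or.inl rfl)⟩, fun d hd => h2 d (Or.inr hd)⟩

lemma comprobar_iff (c1 : List Int) (l : List (List Int)) :
    pvComprobarSub c1 l = true ↔ ∀ c ∈ l, ∀ x ∈ c1, x ∈ c := by
  induction l with
  | nil => simp [pvComprobarSub]
  | cons c cs ih =>
    simp only [pvComprobarSub, List.mem_cons]
    by_cases hs : PySem.Set.issubset c1 c = true
    · simp only [hs, Bool.not_true, Bool.false_eq_true, if_false, ih]
      rw [PySem.Set.issubset_iff] at hs
      constructor
      · intro h d hd
        exact hd.elim (fun e => e ▸ hs) (h d)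
      · intro h d hd
        exact h d (Or.inr hd)
    · have hs' : PySem.Set.issubset c1 c = false := Bool.not_eq_true _ ▸ eq_false_of_ne_true hs
      simp only [hs', Bool.not_false, if_pos]
      rw [Bool.false_eq_true, false_iff]
      intro h
      exact hs ((PySem.Set.issubset_iff _ _).mpr (h c (Or.inl rfl)))


-- ===== VERDICT (by name: the statement is the Claim_ definition above) =====
theorem es_subconjunto_spec : Claim_equal_es_subconjunto := by
  intro c1 l1 _
  unfold Spec_es_subconjunto es_subconjunto es_subconjunto_alt
  by_cases h : c1 = [] ∨ l1 = []
  · simp [h]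
  · simp only [h, if_false]
    match l1 with
    | [] => exact absurd (Or.inr rfl) h
    | c :: rest =>
      rw [show ((if (!true) = true then false else pvComprobarSub c1 (c :: rest)) = pvComprobarSub c1 (c :: rest)) from rfl]
      rw [Bool.eq_iff_iff, comprobar_iff, PySem.Set.issubset_iff]
      simp only [mem_foldl_inter, PySem.Set.mem_ofList]
      constructor
      · intro hA x hx
        exact ⟨hA c (List.mem_cons_self ..) x hx, fun d hd => hA d (List.mem_cons_of_mem _ hd) x hx⟩
      · intro hB d hd x hx
        rcases List.mem_cons.mp hd with rfl | hd'
        · exact (hB x hx).1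
        · exact (hB x hx).2 d hd'
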